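-- pv_equiv track=rewrite | github.com/licklider-ai/logicbench-env | scripts/normalize_pred_with_choices.py | to_letter_index_from_choices
-- ===== SOURCE A (Python) =====
-- def to_letter_index_from_choices(tok, choices):
--     """tok を choices から探し index を返す。まず大小無視の完全一致、次に先頭語一致を試す。なければ None。"""
--     if not isinstance(choices, list):
--         return None
--     # 正規化
--     tok_str = str(tok).strip()
--     tok_cf  = tok_str.casefold()
--
--     c_raw = [str(x) for x in choices]
--     c_norm = [c.strip() for c in c_raw]
--     c_cf   = [c.casefold() for c in c_norm]
--
--     # 1) 大小無視の完全一致
--     if tok_cf in c_cf: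
--         return c_cf.index(tok_cf)
--
--     # 2) 先頭語一致（例: "EMILY" vs "Emily Brontë"）
--     tok_first = tok_cf.split()[0] if tok_cf else ""
--     if tok_first:
--         for i, cc in enumerate(c_cf):
--             first = cc.split()[0] if cc else ""
--             if tok_first == first:
--                 return i
--
--     return None
-- ===== SOURCE B (Python) =====
-- def to_letter_index_from_choices(tok, choices):
--     """Single pass over choices, normalizing each element once and keeping the first
--     exact-match index and the first first-word-match index; resolve after the loop."""
--     if not isinstance(choices, list):
--         return None
--     tok_cf = str(tok).strip().casefold()
--     tok_first = tok_cf.split()[0] if tok_cf else ""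
--     first_exact = None
--     first_firstword = None
--     for i, x in enumerate(choices):
--         cc = str(x).strip().casefold()
--         if first_exact is None and cc == tok_cf:
--             first_exact = i
--         if first_firstword is None and tok_first and (cc.split()[0] if cc else "") == tok_first:
--             first_firstword = i
--     return first_exact if first_exact is not None else first_firstword
-- ===== Notes on version B (the rewrite author's own statement) =====
-- stated objective: alternative
-- what changed: Replaces A's three intermediate normalized lists plus a membership test, a .index() rescan and a second enumerate loop with one enumerate pass that normalizes each element once and tracks the first exact-match and first first-word-match indices, resolved after the loop.
import Mathlib
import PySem

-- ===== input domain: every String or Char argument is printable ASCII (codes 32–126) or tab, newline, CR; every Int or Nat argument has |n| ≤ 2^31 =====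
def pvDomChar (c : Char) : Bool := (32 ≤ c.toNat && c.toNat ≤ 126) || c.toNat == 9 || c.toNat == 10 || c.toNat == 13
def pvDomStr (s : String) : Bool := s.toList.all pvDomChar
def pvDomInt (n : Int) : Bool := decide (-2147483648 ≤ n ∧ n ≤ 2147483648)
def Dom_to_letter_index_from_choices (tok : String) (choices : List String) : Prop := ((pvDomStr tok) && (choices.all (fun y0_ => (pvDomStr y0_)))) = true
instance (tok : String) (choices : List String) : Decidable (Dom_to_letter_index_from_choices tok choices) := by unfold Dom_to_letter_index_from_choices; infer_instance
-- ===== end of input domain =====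

-- ===== PORT A =====
-- B replaces A's three mapped lists + membership test + .index rescan + second loop by one
-- enumerate pass that normalizes each element once and keeps two candidate indices.
-- (Python's casefold is ported as lower: exact on the stated ASCII domain.)

-- str(x).strip().casefold() for a str argument
def pvNorm (x : String) : String := PySem.Str.lower (PySem.Str.strip x)
-- cc.split()[0] if cc else "": cc is always stripped here, so if cc ≠ "" its split() is
-- nonempty and [0] is its head (exact)
def pvFw (cc : String) : String := if cc ≠ "" then (PySem.Str.split₀ cc).headD "" else ""

-- A's second loop: 'for i, cc in enumerate(c_cf): if tok_first == (cc.split()[0] if cc else ""): return i'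
def pvAFirstWordLoop (tok_first : String) (cfs : List String) (i : Int) : Option Int :=
  match cfs with
  | [] => none
  | cc :: rest =>
    let first := pvFw cc
    if tok_first = first then some i else pvAFirstWordLoop tok_first rest (i + 1)

def to_letter_index_from_choices (tok : String) (choices : List String) : Option Int :=
  -- isinstance(choices, list) is always true under the type convention; str(x) on a str is x
  let tok_str := PySem.Str.strip tok
  let tok_cf := PySem.Str.lower tok_str
  let c_raw := choices.map (fun x => x)
  let c_norm := c_raw.map (fun c => PySem.Str.strip c)
  let c_cf := c_norm.map (fun c => PySem.Str.lower c)
  if tok_cf ∈ c_cf then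
    (PySem.List.index? c_cf tok_cf).map (fun n => (n : Int))
  else
    let tok_first := pvFw tok_cf
    if tok_first ≠ "" then pvAFirstWordLoop tok_first c_cf 0 else none

-- ===== PORT B =====
-- B's single loop over the raw choices; state = (first_exact, first_firstword)
def pvBScan (tok_cf tok_first : String) (xs : List String)
    (st : Option Int × Option Int) (i : Int) : Option Int × Option Int :=
  match xs with
  | [] => st
  | x :: rest =>
    let cc := pvNorm x
    let e := if st.1 = none ∧ cc = tok_cf then some i else st.1
    let f := if st.2 = none ∧ tok_first ≠ "" ∧ pvFw cc = tok_first then some i else st.2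
    pvBScan tok_cf tok_first rest (e, f) (i + 1)

def to_letter_index_from_choices_alt (tok : String) (choices : List String) : Option Int :=
  let tok_cf := pvNorm tok
  let tok_first := pvFw tok_cf
  let st := pvBScan tok_cf tok_first choices (none, none) 0
  match st.1 with
  | some e => some e
  | none => st.2

-- ===== PRECONDITION & SPEC =====
def Spec_to_letter_index_from_choices (tok : String) (choices : List String) (out : Option Int) : Prop := out = to_letter_index_from_choices_alt tok choices
instance (tok : String) (choices : List String) (out : Option Int) : Decidable (Spec_to_letter_index_from_choices tok choices out) := by unfold Spec_to_letter_index_from_choices; infer_instance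

-- ===== CLAIM (what is proved, stated in full; the proofs are below) =====
def Claim_equal_to_letter_index_from_choices : Prop := ∀ (tok : String) (choices : List String), Dom_to_letter_index_from_choices tok choices → Spec_to_letter_index_from_choices tok choices (to_letter_index_from_choices tok choices)

-- ===== LEMMAS AND PROOFS =====

-- once the first component is some, the scan keeps it
theorem pvBScan_fst_some (tcf tfw : String) (xs : List String) (a : Int) (f : Option Int) (i : Int) :
    pvBScan tcf tfw xs (some a, f) i = (some a, (pvBScan tcf tfw xs (some a, f) i).2) := by
  induction xs generalizing f i with
  | nil => simp [pvBScan]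
  | cons x rest ih => simp only [pvBScan]; simp; exact ih _ _

theorem pvBScan_snd_some (tcf tfw : String) (xs : List String) (e : Option Int) (b : Int) (i : Int) :
    pvBScan tcf tfw xs (e, some b) i = ((pvBScan tcf tfw xs (e, some b) i).1, some b) := by
  induction xs generalizing e i with
  | nil => simp [pvBScan]
  | cons x rest ih => simp only [pvBScan]; simp; exact ih _ _

-- the first component is index? of the normalized list, offset by i (independent of f)
theorem pvBScan_fst (tcf tfw : String) (xs : List String) (f : Option Int) (i : Int) :
    (pvBScan tcf tfw xs (none, f) i).1
      = (PySem.List.index? (xs.map pvNorm) tcf).map (fun n => (n : Int) + i) := by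
  induction xs generalizing f i with
  | nil => simp [pvBScan, PySem.List.index?_eq_idxOf?]
  | cons x rest ih =>
    simp only [pvBScan, List.map_cons]
    by_cases h : pvNorm x = tcf
    · simp only [h, and_true, if_true]
      rw [pvBScan_fst_some, PySem.List.index?_cons_self]
      simp
    · simp only [h, and_false, if_false]
      rw [PySem.List.index?_cons_of_ne _ h, ih]
      cases PySem.List.index? (rest.map pvNorm) tcf
      · simp
      · simp; omega

-- the second component is A's first-word loop when tok_first is nonempty (independent of e)
theorem pvBScan_snd (tcf tfw : String) (xs : List String) (e : Option Int) (i : Int) (h : tfw ≠ "") :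
    (pvBScan tcf tfw xs (e, none) i).2 = pvAFirstWordLoop tfw (xs.map pvNorm) i := by
  induction xs generalizing e i with
  | nil => simp [pvBScan, pvAFirstWordLoop]
  | cons x rest ih =>
    simp only [pvBScan, List.map_cons, pvAFirstWordLoop]
    by_cases hf : pvFw (pvNorm x) = tfw
    · simp only [hf, h, and_true, ne_eq, not_false_iff, if_true]
      rw [pvBScan_snd_some]
    · simp only [hf, and_false, if_false]
      rw [ih, if_neg (fun hc => hf hc.symm)]

-- with empty tok_first the second component never fires
theorem pvBScan_snd_empty (tcf : String) (xs : List String) (e : Option Int) (i : Int) :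
    (pvBScan tcf "" xs (e, none) i).2 = none := by
  induction xs generalizing e i with
  | nil => simp [pvBScan]
  | cons x rest ih =>
    simp only [pvBScan]
    simp only [ne_eq, not_true, false_and, and_false, if_false]
    exact ih _ _

theorem pv_ccf_eq (choices : List String) :
    ((choices.map (fun x => x)).map (fun c => PySem.Str.strip c)).map (fun c => PySem.Str.lower c)
      = choices.map pvNorm := by
  simp [List.map_map, Function.comp, pvNorm]

-- ===== VERDICT (by name: the statement is the Claim_ definition above) =====
theorem to_letter_index_from_choices_spec : Claim_equal_to_letter_index_from_choices := by
  intro tok choices _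
  unfold Spec_to_letter_index_from_choices
  unfold to_letter_index_from_choices to_letter_index_from_choices_alt
  simp only [pv_ccf_eq]
  have hnorm : PySem.Str.lower (PySem.Str.strip tok) = pvNorm tok := rfl
  rw [hnorm]
  by_cases hmem : pvNorm tok ∈ choices.map pvNorm
  · rw [if_pos hmem]
    rcases Option.isSome_iff_exists.mp
        ((PySem.List.index?_isSome_iff _ _).mpr hmem) with ⟨n, hn⟩
    rw [pvBScan_fst (f := none), hn]
    simp
  · rw [if_neg hmem]
    have hidx : PySem.List.index? (choices.map pvNorm) (pvNorm tok) = none :=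
      (PySem.List.index?_eq_none_iff _ _).mpr hmem
    rw [pvBScan_fst (f := none), hidx]
    by_cases htf : pvFw (pvNorm tok) ≠ ""
    · rw [if_pos htf, pvBScan_snd _ _ _ none _ htf]
      simp
    · rw [if_neg htf]
      rw [not_ne_iff.mp htf, pvBScan_snd_empty]
      simp
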